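-- pv_equiv track=rewrite | github.com/khoa-beep/Pythonbasic | Challenge/ba1.py | sum_of_cubes_odd_number
-- ===== SOURCE A (Python) =====
-- def sum_of_cubes_odd_number(n):
--     if (n <= 0):
--         return -1
--     else:
--         sum = 0
--         for i in range(1, n+1):
--             sum += pow(2*i-1, 3)
--         return sum % (10**9+7)
-- ===== SOURCE B (Python) =====
-- def sum_of_cubes_odd_number(n):
--     # closed form: sum_{i=1..n} (2i-1)^3 = n^2 * (2n^2 - 1)
--     if n <= 0:
--         return -1
--     return (n * n * (2 * n * n - 1)) % (10**9 + 7)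
-- ===== Notes on version B (the rewrite author's own statement) =====
-- stated objective: faster
-- what changed: Replaced the O(n) loop summing cubes of odd numbers with the closed form n^2*(2n^2-1) followed by a single mod.
import Mathlib
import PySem

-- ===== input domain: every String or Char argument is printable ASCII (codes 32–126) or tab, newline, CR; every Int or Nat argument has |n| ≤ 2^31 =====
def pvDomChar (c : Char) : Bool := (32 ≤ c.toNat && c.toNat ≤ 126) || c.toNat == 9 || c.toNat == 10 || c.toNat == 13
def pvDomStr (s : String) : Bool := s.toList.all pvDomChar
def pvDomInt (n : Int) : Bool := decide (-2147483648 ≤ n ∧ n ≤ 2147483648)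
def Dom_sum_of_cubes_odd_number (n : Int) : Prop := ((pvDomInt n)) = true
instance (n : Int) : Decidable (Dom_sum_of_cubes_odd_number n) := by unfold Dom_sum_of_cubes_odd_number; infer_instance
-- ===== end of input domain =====

-- B replaces A's O(n) loop with the closed form n^2*(2n^2-1) mod (10^9+7) (objective: faster).


-- ===== PORT A =====
def sum_of_cubes_odd_number (n : Int) : Int :=
  if n ≤ 0 then -1
  else
    let s := (PySem.List.pyRange 1 (n+1) 1).foldl (fun sum i => sum + (2*i-1)^3) 0
    PySem.Int.mod s (10^9+7)

-- ===== PORT B =====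
def sum_of_cubes_odd_number_alt (n : Int) : Int :=
  if n ≤ 0 then -1
  else PySem.Int.mod (n * n * (2 * n * n - 1)) (10^9+7)

-- ===== PRECONDITION & SPEC =====
def Spec_sum_of_cubes_odd_number (n : Int) (out : Int) : Prop := out = sum_of_cubes_odd_number_alt n
instance (n : Int) (out : Int) : Decidable (Spec_sum_of_cubes_odd_number n out) := by unfold Spec_sum_of_cubes_odd_number; infer_instance

-- ===== CLAIM (what is proved, stated in full; the proofs are below) =====
def Claim_equal_sum_of_cubes_odd_number : Prop := ∀ (n : Int), Dom_sum_of_cubes_odd_number n → Spec_sum_of_cubes_odd_number n (sum_of_cubes_odd_number n)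

-- ===== LEMMAS AND PROOFS =====

-- loop invariant / closed form: the sum of the first n odd cubes is n^2*(2n^2-1)
lemma cubes_foldl_closed (k : Nat) (init : Int) :
    (PySem.List.pyRange 1 ((k : Int)+1) 1).foldl (fun sum i => sum + (2*i-1)^3) init
      = init + (k : Int)^2 * (2*(k : Int)^2 - 1) := by
  induction k with
  | zero => simp [PySem.List.pyRange_one_eq_nil]
  | succ m ih =>
    have h : (1 : Int) ≤ (m : Int) + 1 := by omega
    have : ((m : Int) + 1 + 1) = (((m : Int) + 1) + 1) := by ring
    rw [show ((m+1 : Nat) : Int) + 1 = ((m : Int) + 1) + 1 by push_cast; ring,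
        PySem.List.pyRange_one_succ_right h, List.foldl_append, ih]
    push_cast
    simp only [List.foldl_cons, List.foldl_nil]
    ring

-- ===== VERDICT (by name: the statement is the Claim_ definition above) =====
theorem sum_of_cubes_odd_number_spec : Claim_equal_sum_of_cubes_odd_number := by
  intro n _
  unfold Spec_sum_of_cubes_odd_number sum_of_cubes_odd_number sum_of_cubes_odd_number_alt
  by_cases hn : n ≤ 0
  · simp [hn]
  · simp only [hn, if_false]
    push Not at hn
    obtain ⟨k, rfl⟩ := Int.eq_ofNat_of_zero_le (le_of_lt hn)
    rw [cubes_foldl_closed k 0]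
    ring_nf
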